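-- pv_equiv track=rewrite | github.com/DaeYejun2/YejunBaekjoon | 프로그래머스/1/42862. 체육복/체육복.py | solution
-- ===== SOURCE A (Python) =====
-- def solution(n, lost, reserve):
--     actual_reserve = sorted(list(set(reserve) - set(lost)))
--     actual_lost = sorted(list(set(lost) - set(reserve)))
--
--     for r in actual_reserve:
--         if r - 1 in actual_lost:
--             actual_lost.remove(r - 1)
--         elif r + 1 in actual_lost:
--             actual_lost.remove(r + 1)
--
--     return n - len(actual_lost)
-- ===== SOURCE B (Python) =====
-- def solution(n, lost, reserve):
--     L = sorted(set(lost) - set(reserve))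
--     R = sorted(set(reserve) - set(lost))
--     i = j = 0
--     unmatched = 0
--     while i < len(L):
--         if j >= len(R):
--             unmatched += 1
--             i += 1
--         elif L[i] < R[j] - 1:
--             unmatched += 1
--             i += 1
--         elif L[i] <= R[j] + 1:
--             i += 1
--             j += 1
--         else:
--             j += 1
--     return n - unmatched
-- ===== Notes on version B (the rewrite author's own statement) =====
-- stated objective: faster
-- what changed: A's loop over reserves does a membership scan and list.remove on actual_lost for each reserve (quadratic matching); B walks the two sorted deduplicated lists once with two pointers, counting unmatched lost students in a single linear merge pass.
import Mathlib
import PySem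

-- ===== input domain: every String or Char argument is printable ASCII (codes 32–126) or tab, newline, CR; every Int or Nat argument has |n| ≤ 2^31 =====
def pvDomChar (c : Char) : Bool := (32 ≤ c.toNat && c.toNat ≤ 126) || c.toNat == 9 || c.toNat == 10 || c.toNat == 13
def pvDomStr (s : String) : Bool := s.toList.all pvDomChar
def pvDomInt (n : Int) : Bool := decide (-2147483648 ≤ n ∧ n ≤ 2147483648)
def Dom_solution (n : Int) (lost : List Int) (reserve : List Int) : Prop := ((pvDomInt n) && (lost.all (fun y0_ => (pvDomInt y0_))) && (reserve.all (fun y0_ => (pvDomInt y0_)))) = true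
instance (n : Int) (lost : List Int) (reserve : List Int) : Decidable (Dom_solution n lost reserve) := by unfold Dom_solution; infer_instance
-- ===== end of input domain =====

-- B replaces A's per-reserve membership/remove scans over actual_lost with a single two-pointer
-- merge pass over the two sorted lists (alternative decomposition; return value only).

-- ===== PORT A =====
-- one iteration of A's for-loop body (actual_lost is the state)
def stepA (L : List Int) (r : Int) : List Int :=
  if (r - 1) ∈ L then (PySem.List.remove? L (r - 1)).getD L
  else if (r + 1) ∈ L then (PySem.List.remove? L (r + 1)).getD L
  else L

def solution (n : Int) (lost : List Int) (reserve : List Int) : Int :=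
  let actual_reserve := PySem.List.sorted (PySem.Set.diff (PySem.Set.ofList reserve) (PySem.Set.ofList lost)) (fun x => x) false
  let actual_lost := PySem.List.sorted (PySem.Set.diff (PySem.Set.ofList lost) (PySem.Set.ofList reserve)) (fun x => x) false
  n - (actual_reserve.foldl stepA actual_lost).length

-- ===== PORT B =====
-- B's while-loop: a simultaneous pass over both sorted lists, counting unmatched lost students
def twoPtr : List Int → List Int → Int
  | [], _ => 0
  | _ :: L', [] => 1 + twoPtr L' []
  | l :: L', r :: R' =>
    if l < r - 1 then 1 + twoPtr L' (r :: R')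
    else if l ≤ r + 1 then twoPtr L' R'
    else twoPtr (l :: L') R'
termination_by L R => (L.length, R.length)

def solution_alt (n : Int) (lost : List Int) (reserve : List Int) : Int :=
  let L := PySem.List.sorted (PySem.Set.diff (PySem.Set.ofList lost) (PySem.Set.ofList reserve)) (fun x => x) false
  let R := PySem.List.sorted (PySem.Set.diff (PySem.Set.ofList reserve) (PySem.Set.ofList lost)) (fun x => x) false
  n - twoPtr L R

-- ===== PRECONDITION & SPEC =====
def Spec_solution (n : Int) (lost : List Int) (reserve : List Int) (out : Int) : Prop := out = solution_alt n lost reserve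
instance (n : Int) (lost : List Int) (reserve : List Int) (out : Int) : Decidable (Spec_solution n lost reserve out) := by unfold Spec_solution; infer_instance

-- ===== CLAIM (what is proved, stated in full; the proofs are below) =====
def Claim_equal_solution : Prop := ∀ (n : Int) (lost : List Int) (reserve : List Int), Dom_solution n lost reserve → Spec_solution n lost reserve (solution n lost reserve)

-- ===== LEMMAS AND PROOFS =====

theorem getD_map_cons (o : Option (List Int)) (l : Int) (M : List Int) :
    (o.map (l :: ·)).getD (l :: M) = l :: o.getD M := by cases o <;> rfl

theorem stepA_nil (r : Int) : stepA [] r = [] := by simp [stepA]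

theorem foldl_stepA_nil (R : List Int) : R.foldl stepA [] = [] := by
  induction R with
  | nil => rfl
  | cons r R ih => simpa [stepA_nil] using ih

theorem stepA_cons_lt (l r : Int) (M : List Int) (h : l < r - 1) :
    stepA (l :: M) r = l :: stepA M r := by
  have h1 : r - 1 ≠ l := by omega
  have h2 : r + 1 ≠ l := by omega
  simp only [stepA, List.mem_cons,
    PySem.List.remove?_cons_of_ne M (show l ≠ r - 1 by omega),
    PySem.List.remove?_cons_of_ne M (show l ≠ r + 1 by omega), getD_map_cons]
  split_ifs <;> simp_all

theorem foldl_stepA_cons_lt (l : Int) (M R : List Int) (h : ∀ r ∈ R, l < r - 1) :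
    R.foldl stepA (l :: M) = l :: R.foldl stepA M := by
  induction R generalizing M with
  | nil => rfl
  | cons r R ih =>
    simp only [List.foldl_cons, stepA_cons_lt l r M (h r (by simp))]
    exact ih _ (fun r' hr' => h r' (by simp [hr']))

theorem main_lemma (L R : List Int)
    (hL : L.Pairwise (· < ·)) (hR : R.Pairwise (· < ·))
    (hD : ∀ x ∈ L, x ∉ R) :
    ((R.foldl stepA L).length : Int) = twoPtr L R := by
  induction L, R using twoPtr.induct with
  | case1 R => simp [foldl_stepA_nil, twoPtr]
  | case2 l L' ih =>
    have hL' := (List.pairwise_cons.mp hL).2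
    simp only [List.foldl_nil] at ih ⊢
    rw [show twoPtr (l :: L') [] = 1 + twoPtr L' [] by simp [twoPtr],
      ← ih hL' (by simp) (by simp)]
    simp; omega
  | case3 l L' r R' h ih =>
    obtain ⟨hl, hL'⟩ := List.pairwise_cons.mp hL
    have hall : ∀ r' ∈ r :: R', l < r' - 1 := by
      intro r' hr'
      rcases List.mem_cons.mp hr' with rfl | hm
      · exact h
      · have := (List.pairwise_cons.mp hR).1 r' hm; omega
    rw [foldl_stepA_cons_lt l L' (r :: R') hall]
    rw [show twoPtr (l :: L') (r :: R') = 1 + twoPtr L' (r :: R') by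
      simp [twoPtr, h]]
    rw [← ih hL' hR (fun x hx => hD x (by simp [hx]))]
    simp; omega
  | case4 l L' r R' h1 h2 ih =>
    obtain ⟨hl, hL'⟩ := List.pairwise_cons.mp hL
    have hR' := (List.pairwise_cons.mp hR).2
    have hne : l ≠ r := fun he => hD l (by simp) (by simp [he])
    have hcase : l = r - 1 ∨ l = r + 1 := by omega
    have hstep : stepA (l :: L') r = L' := by
      rcases hcase with rfl | rfl
      · simp [stepA]
      · have hnm : r - 1 ∉ (r + 1) :: L' := by
          simp only [List.mem_cons, not_or]
          constructor
          · omega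
          · intro hm; have := hl _ hm; omega
        simp [stepA, hnm]
    simp only [List.foldl_cons, hstep]
    rw [show twoPtr (l :: L') (r :: R') = twoPtr L' R' by simp [twoPtr, h1, h2]]
    exact ih hL' hR' (fun x hx => fun hxr => hD x (by simp [hx]) (by simp [hxr]))
  | case5 l L' r R' h1 h2 ih =>
    have hl := (List.pairwise_cons.mp hL).1
    have hR' := (List.pairwise_cons.mp hR).2
    have hstep : stepA (l :: L') r = l :: L' := by
      have hm1 : r - 1 ∉ l :: L' := by
        simp only [List.mem_cons, not_or]
        exact ⟨by omega, fun hm => by have := hl _ hm; omega⟩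
      have hm2 : r + 1 ∉ l :: L' := by
        simp only [List.mem_cons, not_or]
        exact ⟨by omega, fun hm => by have := hl _ hm; omega⟩
      simp [stepA, hm1, hm2]
    simp only [List.foldl_cons, hstep]
    rw [show twoPtr (l :: L') (r :: R') = twoPtr (l :: L') R' by
      simp [twoPtr, h1, h2]]
    exact ih hL (List.pairwise_cons.mp hR).2
      (fun x hx hxr => hD x hx (by simp [hxr]))

theorem pairwise_lt_sorted_diff (a b : List Int) :
    (PySem.List.sorted (PySem.Set.diff (PySem.Set.ofList a) (PySem.Set.ofList b)) (fun x => x) false).Pairwise (· < ·) := by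
  have hle := PySem.List.sorted_pairwise (xs := PySem.Set.diff (PySem.Set.ofList a) (PySem.Set.ofList b)) (key := fun x => x)
  have hnd : (PySem.List.sorted (PySem.Set.diff (PySem.Set.ofList a) (PySem.Set.ofList b)) (fun x => x) false).Nodup := by
    refine (PySem.List.sorted_perm _ _ _).nodup_iff.mpr ?_
    exact PySem.Set.nodup_diff _ _ (PySem.Set.nodup_ofList a)
  exact (hle.and hnd).imp (fun h => lt_of_le_of_ne h.1 h.2)

-- ===== VERDICT (by name: the statement is the Claim_ definition above) =====
theorem solution_spec : Claim_equal_solution := by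
  intro n lost reserve _
  show _ = _
  unfold solution solution_alt
  simp only []
  have hD : ∀ x ∈ PySem.List.sorted (PySem.Set.diff (PySem.Set.ofList lost) (PySem.Set.ofList reserve)) (fun x => x) false,
      x ∉ PySem.List.sorted (PySem.Set.diff (PySem.Set.ofList reserve) (PySem.Set.ofList lost)) (fun x => x) false := by
    intro x hx hx'
    rw [PySem.List.mem_sorted] at hx hx'
    have h1 := ((PySem.Set.mem_diff _ _ _).mp hx).2
    have h2 := ((PySem.Set.mem_diff _ _ _).mp hx').1
    rw [PySem.Set.mem_ofList] at h1 h2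
    exact h1 h2
  rw [main_lemma _ _ (pairwise_lt_sorted_diff lost reserve) (pairwise_lt_sorted_diff reserve lost) hD]
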